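-- pv_equiv track=rewrite | github.com/Amitai88/miRmedon | miRmedon_src/consensus_generator.py | length_correction
-- ===== SOURCE A (Python) =====
-- def length_correction(sequences, qual_lists):
--     if all(isinstance(x, str) for x in qual_lists):
--         qual_lists = [[ord(c)-33 for c in seq] for seq in qual_lists]
--     corrected_qual_lists = []
--     for i in range(len(sequences)):
--         startGapLen = 0
--         endGapLen = 0
--         for j in range(len(sequences[i])):
--             if sequences[i][j] not in ['A', 'T', 'C', 'G', 'N']:
--                 startGapLen += 1
--             else:
--                 break
--         for j in range(len(sequences[i]))[::-1]:
--             if sequences[i][j] not in ['A', 'T', 'C', 'G', 'N']: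
--                 endGapLen += 1
--             else:
--                 break
--         corrected_qual_lists.append([99]*startGapLen + qual_lists[i] + [99]*endGapLen)
--     return corrected_qual_lists
-- ===== SOURCE B (Python) =====
-- def length_correction(sequences, qual_lists):
--     if all(isinstance(x, str) for x in qual_lists):
--         qual_lists = [[ord(c) - 33 for c in seq] for seq in qual_lists]
--     out = []
--     for seq, qual in zip(sequences, qual_lists):
--         pos = [i for i, c in enumerate(seq) if c in 'ATCGN']
--         start = pos[0] if pos else len(seq)
--         end = len(seq) - 1 - pos[-1] if pos else len(seq)
--         out.append([99] * start + qual + [99] * end)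
--     return out
-- ===== Notes on version B (the rewrite author's own statement) =====
-- stated objective: alternative
-- what changed: Instead of two index-scanning break loops per sequence (forward and over range(...)[::-1]), B collects all nucleotide positions in one enumerate pass and derives both gap lengths from the first and last position (falling back to len(seq) when there is none), assembling the result with zip instead of indexing.
import Mathlib
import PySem

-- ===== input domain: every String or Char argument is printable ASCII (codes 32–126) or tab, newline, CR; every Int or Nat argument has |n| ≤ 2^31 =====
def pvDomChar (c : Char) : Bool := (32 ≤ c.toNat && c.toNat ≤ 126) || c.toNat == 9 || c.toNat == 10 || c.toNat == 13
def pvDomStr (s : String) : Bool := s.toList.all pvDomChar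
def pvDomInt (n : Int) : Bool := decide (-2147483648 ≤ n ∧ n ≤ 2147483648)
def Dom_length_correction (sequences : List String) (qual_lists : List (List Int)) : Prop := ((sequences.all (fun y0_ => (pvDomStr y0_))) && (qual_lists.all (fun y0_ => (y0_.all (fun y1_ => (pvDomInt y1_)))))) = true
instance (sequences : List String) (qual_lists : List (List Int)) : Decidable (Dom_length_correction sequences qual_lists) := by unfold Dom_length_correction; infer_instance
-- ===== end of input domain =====

-- B replaces A's two index-scanning break loops per sequence by one enumerate pass collecting all
-- nucleotide positions and deriving both gap lengths from its first and last element (objective: alternative).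
-- Under the List (List Int) typing, A's `all(isinstance(x, str))` branch is an identity
-- (False on nonempty qual_lists, a no-op on []), so neither port carries it.

-- ===== PORT A =====
def pvIsNucA (c : Char) : Bool := (['A', 'T', 'C', 'G', 'N'] : List Char).contains c

-- A's inner `for j in js: if s[j] not in [...]: g += 1 else: break` loop
def pvScan (cs : List Char) (js : List Int) : Int :=
  match js with
  | [] => 0
  | j :: rest => if !(pvIsNucA (PySem.List.pyGetD cs j ' ')) then 1 + pvScan cs rest else 0

-- body of A's `for i in range(len(sequences))` loop (the value appended for index i)
def pvBody (sequences : List String) (qual_lists : List (List Int)) (i : Int) : List Int :=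
  let cs := (PySem.List.pyGetD sequences i "").toList
  let startGapLen := pvScan cs (PySem.List.pyRange 0 (cs.length : Int) 1)
  let endGapLen := pvScan cs ((PySem.List.slice? (PySem.List.pyRange 0 (cs.length : Int) 1) none none (-1)).getD [])
  List.replicate startGapLen.toNat 99 ++ PySem.List.pyGetD qual_lists i [] ++ List.replicate endGapLen.toNat 99

def length_correction (sequences : List String) (qual_lists : List (List Int)) : List (List Int) :=
  (PySem.List.pyRange 0 (sequences.length : Int) 1).foldl
    (fun acc i => acc ++ [pvBody sequences qual_lists i]) []

-- ===== PORT B =====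
def pvIsNucB (c : Char) : Bool := ("ATCGN".toList).contains c

-- `[i for i, c in enumerate(seq) if c in 'ATCGN']`, k the running enumerate index
def pvNucPos (cs : List Char) (k : Nat) : List Nat :=
  match cs with
  | [] => []
  | c :: rest => if pvIsNucB c then k :: pvNucPos rest (k + 1) else pvNucPos rest (k + 1)

-- body of B's loop over zip(sequences, qual_lists)
def pvElem (sq : String × List Int) : List Int :=
  let cs := sq.1.toList
  let pos := pvNucPos cs 0
  let start := match pos with | [] => cs.length | h :: _ => h
  let endG := match pos.getLast? with | none => cs.length | some l => cs.length - 1 - l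
  List.replicate start 99 ++ sq.2 ++ List.replicate endG 99

def length_correction_alt (sequences : List String) (qual_lists : List (List Int)) : List (List Int) :=
  (sequences.zip qual_lists).map pvElem


-- ===== PRECONDITION & SPEC =====
-- A indexes qual_lists[i] for every i < len(sequences): it raises IndexError iff qual_lists is shorter.
def Pre_length_correction (sequences : List String) (qual_lists : List (List Int)) : Prop :=
  sequences.length ≤ qual_lists.length
instance (sequences : List String) (qual_lists : List (List Int)) : Decidable (Pre_length_correction sequences qual_lists) := by unfold Pre_length_correction; infer_instance

def pvWitness_length_correction : List String × List (List Int) := (["--AG-N.", "x"], [[1, 2], [7]])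

def Spec_length_correction (sequences : List String) (qual_lists : List (List Int)) (out : List (List Int)) : Prop := out = length_correction_alt sequences qual_lists
instance (sequences : List String) (qual_lists : List (List Int)) (out : List (List Int)) : Decidable (Spec_length_correction sequences qual_lists out) := by unfold Spec_length_correction; infer_instance

-- ===== CLAIM (what is proved, stated in full; the proofs are below) =====
def Claim_equal_length_correction : Prop := ∀ (sequences : List String) (qual_lists : List (List Int)), Dom_length_correction sequences qual_lists → Pre_length_correction sequences qual_lists → Spec_length_correction sequences qual_lists (length_correction sequences qual_lists)

-- ===== LEMMAS AND PROOFS =====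
def pvQ (c : Char) : Bool := !(pvIsNucA c)

def pvT (cs : List Char) : Nat := (cs.takeWhile pvQ).length

theorem pvIsNucB_eq (c : Char) : pvIsNucB c = pvIsNucA c := by
  have h : "ATCGN".toList = ['A', 'T', 'C', 'G', 'N'] := rfl
  simp [pvIsNucB, pvIsNucA, h]

theorem pvScan_eq_T (js : List Int) (cs : List Char) :
    pvScan cs js = ((((js.map (fun j => PySem.List.pyGetD cs j ' ')).takeWhile pvQ).length : Nat) : Int) := by
  induction js with
  | nil => simp [pvScan]
  | cons j rest ih =>
    by_cases h : pvIsNucA (PySem.List.pyGetD cs j ' ')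
    · simp [pvScan, h, pvQ]
    · simp [pvScan, h, pvQ, ih]
      omega

theorem pvScan_fwd (cs : List Char) :
    pvScan cs (PySem.List.pyRange 0 (cs.length : Int) 1) = (pvT cs : Int) := by
  rw [pvScan_eq_T, PySem.List.map_pyGetD_pyRange_zero']
  rfl

theorem pvScan_bwd (cs : List Char) :
    pvScan cs ((PySem.List.slice? (PySem.List.pyRange 0 (cs.length : Int) 1) none none (-1)).getD []) = (pvT cs.reverse : Int) := by
  rw [PySem.List.slice?_none_none_neg_one, Option.getD_some, pvScan_eq_T,
    List.map_reverse, PySem.List.map_pyGetD_pyRange_zero']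
  rfl

theorem pvNucPos_shift (cs : List Char) (k : Nat) :
    pvNucPos cs k = (pvNucPos cs 0).map (· + k) := by
  induction cs generalizing k with
  | nil => simp [pvNucPos]
  | cons c rest ih =>
    by_cases h : pvIsNucB c
    · simp only [pvNucPos, if_pos h, ih (k + 1), ih 1, List.map_map, List.map_cons]
      refine List.cons_eq_cons.mpr ⟨by omega, ?_⟩
      exact List.map_congr_left (fun x _ => by simp [Function.comp]; omega)
    · simp only [pvNucPos, if_neg h, ih (k + 1), ih 1, List.map_map]
      exact List.map_congr_left (fun x _ => by simp [Function.comp]; omega)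

theorem pvNucPos_nil_iff (cs : List Char) (k : Nat) :
    pvNucPos cs k = [] ↔ cs.all pvQ := by
  induction cs generalizing k with
  | nil => simp [pvNucPos]
  | cons c rest ih =>
    by_cases h : pvIsNucB c
    · simp [pvNucPos, h, pvQ, ← pvIsNucB_eq, List.all_cons]
    · simp [pvNucPos, h, pvQ, ← pvIsNucB_eq, List.all_cons, ih (k + 1)]

theorem pvT_all {cs : List Char} (h : cs.all pvQ) : pvT cs = cs.length := by
  induction cs with
  | nil => rfl
  | cons c rest ih =>
    simp only [List.all_cons, Bool.and_eq_true] at h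
    simp [pvT, List.takeWhile, h.1]
    exact ih h.2

theorem pvT_lt {cs : List Char} (h : ¬ cs.all pvQ = true) : pvT cs < cs.length := by
  induction cs with
  | nil => simp at h
  | cons c rest ih =>
    by_cases hc : pvQ c
    · simp only [List.all_cons, hc, Bool.true_and] at h
      simpa [pvT, List.takeWhile, hc] using ih h
    · simp [pvT, List.takeWhile, hc]

theorem pvNucPos_head {cs : List Char} (h : ¬ cs.all pvQ = true) :
    (pvNucPos cs 0).head? = some (pvT cs) := by
  induction cs with
  | nil => simp at h
  | cons c rest ih =>
    by_cases hn : pvIsNucB c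
    · simp [pvNucPos, hn, pvT, List.takeWhile, pvQ, ← pvIsNucB_eq]
    · have hq : pvQ c = true := by simp [pvQ, ← pvIsNucB_eq, hn]
      simp only [List.all_cons, hq, Bool.true_and] at h
      rw [pvNucPos, if_neg hn, pvNucPos_shift _ 1, List.head?_map, ih h]
      simp [pvT, List.takeWhile, hq]

theorem pvNucPos_append (xs : List Char) (c : Char) (k : Nat) :
    pvNucPos (xs ++ [c]) k = pvNucPos xs k ++ (if pvIsNucB c then [k + xs.length] else []) := by
  induction xs generalizing k with
  | nil => simp [pvNucPos]
  | cons x rest ih =>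
    have harith : k + 1 + rest.length = k + (rest.length + 1) := by omega
    by_cases hx : pvIsNucB x
    · simp only [List.cons_append, pvNucPos, if_pos hx, ih (k + 1), List.length_cons,
        List.cons_append, harith]
    · simp only [List.cons_append, pvNucPos, if_neg hx, ih (k + 1), List.length_cons, harith]

theorem pvNucPos_last {cs : List Char} (h : ¬ cs.all pvQ = true) :
    (pvNucPos cs 0).getLast? = some (cs.length - 1 - pvT cs.reverse) := by
  induction cs using List.reverseRecOn with
  | nil => simp at h
  | append_singleton xs c ih =>
    rw [pvNucPos_append]
    by_cases hn : pvIsNucB c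
    · have hq : pvQ c = false := by simp [pvQ, ← pvIsNucB_eq, hn]
      simp [hn, pvT, hq]
    · have hq : pvQ c = true := by simp [pvQ, ← pvIsNucB_eq, hn]
      have hxs : ¬ xs.all pvQ = true := by
        simp only [List.all_append, List.all_cons, List.all_nil, hq, Bool.and_true] at h
        exact h
      rw [if_neg hn, List.append_nil, ih hxs]
      have hb : pvT xs.reverse < xs.length := by
        have := pvT_lt (cs := xs.reverse) (by simpa [List.all_reverse] using hxs)
        simpa using this
      have hcons : pvT (c :: xs.reverse) = 1 + pvT xs.reverse := by
        simp [pvT, List.takeWhile, hq]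
        omega
      simp only [List.reverse_append, List.reverse_singleton, List.singleton_append,
        List.length_append, List.length_singleton, hcons, Option.some.injEq]
      omega

theorem pvBodyVal_eq (s : String) (q : List Int) :
    List.replicate (pvScan s.toList (PySem.List.pyRange 0 (s.toList.length : Int) 1)).toNat 99 ++ q
      ++ List.replicate (pvScan s.toList ((PySem.List.slice? (PySem.List.pyRange 0 (s.toList.length : Int) 1) none none (-1)).getD [])).toNat 99
      = pvElem (s, q) := by
  rw [pvScan_fwd, pvScan_bwd, Int.toNat_natCast, Int.toNat_natCast]
  show _ = (List.replicate (match pvNucPos s.toList 0 with | [] => s.toList.length | h :: _ => h) (99:Int) ++ q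
    ++ List.replicate (match (pvNucPos s.toList 0).getLast? with | none => s.toList.length | some l => s.toList.length - 1 - l) (99:Int))
  by_cases hall : s.toList.all pvQ
  · rw [(pvNucPos_nil_iff s.toList 0).mpr hall]
    have hrev : s.toList.reverse.all pvQ := by simpa [List.all_reverse] using hall
    simp [pvT_all hall, pvT_all hrev]
  · obtain ⟨h0, t, hpos⟩ := List.exists_cons_of_ne_nil
      (fun hnil => hall ((pvNucPos_nil_iff s.toList 0).mp hnil))
    have hhead := pvNucPos_head hall
    have hlast := pvNucPos_last hall
    rw [hpos] at hhead hlast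
    simp only [List.head?_cons, Option.some.injEq] at hhead
    subst hhead
    have hb : pvT s.toList.reverse < s.toList.length := by
      have := pvT_lt (cs := s.toList.reverse) (by simpa [List.all_reverse] using hall)
      simpa using this
    have harith : s.toList.length - 1 - (s.toList.length - 1 - pvT s.toList.reverse)
        = pvT s.toList.reverse := by omega
    simp only [hpos, hlast, harith]

theorem main_eq (sequences : List String) (qual_lists : List (List Int))
    (hpre : sequences.length ≤ qual_lists.length) :
    length_correction sequences qual_lists = length_correction_alt sequences qual_lists := by
  unfold length_correction length_correction_alt
  rw [PySem.List.foldl_append_singleton_eq_map]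
  apply List.ext_getElem
  · simp [PySem.List.length_pyRange_one]
    omega
  · intro k hk1 hk2
    simp only [List.nil_append, List.getElem_map]
    rw [PySem.List.getElem_pyRange_one, zero_add]
    have hks : k < sequences.length := by
      simpa [PySem.List.length_pyRange_one] using hk1
    have hkq : k < qual_lists.length := by omega
    rw [List.getElem_zip]
    simp only [pvBody, PySem.List.pyGetD_natCast]
    rw [List.getD_eq_getElem _ _ hks, List.getD_eq_getElem _ _ hkq]
    exact pvBodyVal_eq _ _


-- ===== VERDICT (by name: the statement is the Claim_ definition above) =====
theorem length_correction_spec : Claim_equal_length_correction := by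
  intro sequences qual_lists _ hpre
  unfold Spec_length_correction
  exact main_eq sequences qual_lists hpre
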